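-- pv_equiv track=rewrite | github.com/eth-sri/sven | sven/utils.py | side_by_side
-- ===== SOURCE A (Python) =====
-- def side_by_side(strings, size=120, space=10):
--     ss = list(map(lambda s: s.split('\n'), strings))
--     max_len = max(map(lambda s: len(s), ss))
--     result = ['' for _ in range(max_len)]
--
--     for i in range(max_len):
--         for j, s in enumerate(ss):
--             if i >= len(s):
--                 result[i] += ' ' * size
--             else:
--                 if len(s[i]) >= size:
--                     result[i] += s[i][:size]
--                 else:
--                     result[i] += s[i] + ' ' * (size - len(s[i]))
--
--             if j < len(ss) - 1:
--                 result[i] += ' ' * space + '|' + ' ' * space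
--
--     for i in range(max_len):
--         result[i] = result[i].replace('\t', ' ')
--
--     return '\n'.join(result)
-- ===== SOURCE B (Python) =====
-- def side_by_side(strings, size=120, space=10):
--     sep = ' ' * space + '|' + ' ' * space
--     columns = [s.split('\n') for s in strings]
--     max_len = max(map(len, columns), default=0)
--     blank = (' ' * size)[:size]
--     padded = [[(line + ' ' * (size - len(line)))[:size] for line in col]
--               + [blank] * (max_len - len(col)) for col in columns]
--     rows = [sep.join(cells).replace('\t', ' ') for cells in zip(*padded)]
--     return '\n'.join(rows)
-- ===== Notes on version B (the rewrite author's own statement) =====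
-- stated objective: alternative
-- what changed: A fills each output row cell-by-cell in a row-major double loop over mutable row strings; B builds each padded fixed-width column up front, transposes the equal-length columns with zip(*...), and joins each row with the precomputed separator.
-- outside the precondition, e.g. on side_by_side([], 120, 10): A raises ValueError, B returns ''
import Mathlib
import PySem

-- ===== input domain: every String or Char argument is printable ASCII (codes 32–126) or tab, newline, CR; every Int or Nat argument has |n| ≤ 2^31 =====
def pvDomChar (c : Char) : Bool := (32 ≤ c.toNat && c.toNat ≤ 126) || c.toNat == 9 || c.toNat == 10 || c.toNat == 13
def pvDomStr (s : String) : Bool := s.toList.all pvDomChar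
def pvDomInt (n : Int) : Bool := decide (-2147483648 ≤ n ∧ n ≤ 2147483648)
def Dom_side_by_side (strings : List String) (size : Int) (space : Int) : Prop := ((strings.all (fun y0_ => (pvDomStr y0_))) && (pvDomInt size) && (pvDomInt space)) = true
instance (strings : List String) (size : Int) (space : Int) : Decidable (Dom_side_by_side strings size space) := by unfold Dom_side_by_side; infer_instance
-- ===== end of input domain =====

-- B re-decomposes A: instead of A's row-major loop appending cell-by-cell into mutable rows,
-- B builds each padded COLUMN of fixed-width cells up front, transposes (zip(*...)), and joins.
-- Shared primitive: Python's ' ' * n (negative n gives "").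
def pvSpaces (n : Int) : List Char := List.replicate n.toNat ' '

-- ===== PORT A =====
def side_by_side (strings : List String) (size : Int) (space : Int) : String :=
  let ss : List (List (List Char)) := strings.map (fun s => PySem.Chars.splitOn s.toList ['\n'])
  -- max(map(len, ss)): Python raises ValueError when strings = [] (excluded by Pre_); the .getD 0 is unreached under Pre_
  let maxLen : Nat := ((PySem.List.max? (ss.map (fun s => (s.length : Int))) id).getD 0).toNat
  let result : List (List Char) := (List.range maxLen).map (fun i =>
    (PySem.List.enumerate ss).foldl (fun acc js =>
      if js.1 < (ss.length : Int) - 1 then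
        (acc ++
          (if js.2.length ≤ i then pvSpaces size
           else if size ≤ ((js.2.getD i []).length : Int) then PySem.List.slice (js.2.getD i []) none (some size)
           else js.2.getD i [] ++ pvSpaces (size - (js.2.getD i []).length))) ++
        (pvSpaces space ++ ['|'] ++ pvSpaces space)
      else
        acc ++
          (if js.2.length ≤ i then pvSpaces size
           else if size ≤ ((js.2.getD i []).length : Int) then PySem.List.slice (js.2.getD i []) none (some size)
           else js.2.getD i [] ++ pvSpaces (size - (js.2.getD i []).length))) [])
  let result2 : List (List Char) := result.map (fun r => PySem.Chars.replace r ['\t'] [' '])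
  String.ofList (PySem.Chars.join ['\n'] result2)

-- ===== PORT B =====
-- cell(line) = (line + ' ' * (size - len(line)))[:size]
def pvCellB (size : Int) (line : List Char) : List Char :=
  PySem.List.slice (line ++ pvSpaces (size - line.length)) none (some size)

-- zip(*cols) transcribed: take heads while every column is nonempty
def pvZipAll (cols : List (List (List Char))) : List (List (List Char)) :=
  match cols with
  | [] => []
  | c :: rest =>
    if (c :: rest).all (fun l => !l.isEmpty) then
      (c :: rest).map (fun l => l.headD []) :: pvZipAll ((c :: rest).map (fun l => l.tail))
    else []
termination_by (cols.headD []).length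
decreasing_by
  simp_all
  cases c with
  | nil => simp_all
  | cons a t => simpa using Nat.lt_succ_self t.length

def side_by_side_alt (strings : List String) (size : Int) (space : Int) : String :=
  let sep : List Char := pvSpaces space ++ ['|'] ++ pvSpaces space
  let columns : List (List (List Char)) := strings.map (fun s => PySem.Chars.splitOn s.toList ['\n'])
  let maxLen : Nat := ((PySem.List.max? (columns.map (fun c => (c.length : Int))) id).getD 0).toNat
  let blank : List Char := PySem.List.slice (pvSpaces size) none (some size)
  let padded : List (List (List Char)) :=
    columns.map (fun c => c.map (pvCellB size) ++ List.replicate (maxLen - c.length) blank)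
  let rows : List (List Char) :=
    (pvZipAll padded).map (fun cells => PySem.Chars.replace (PySem.Chars.join sep cells) ['\t'] [' '])
  String.ofList (PySem.Chars.join ['\n'] rows)

-- ===== PRECONDITION & SPEC =====
-- Pre_ excludes only strings = [], on which Python A raises ValueError (max() of an empty sequence).
def Pre_side_by_side (strings : List String) (size : Int) (space : Int) : Prop := strings ≠ []
instance (strings : List String) (size : Int) (space : Int) : Decidable (Pre_side_by_side strings size space) := by unfold Pre_side_by_side; infer_instance
def pvWitness_side_by_side : List String × Int × Int := (["ab\ncd", "x"], 3, 1)

def Spec_side_by_side (strings : List String) (size : Int) (space : Int) (out : String) : Prop := out = side_by_side_alt strings size space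
instance (strings : List String) (size : Int) (space : Int) (out : String) : Decidable (Spec_side_by_side strings size space out) := by unfold Spec_side_by_side; infer_instance

-- ===== CLAIM (what is proved, stated in full; the proofs are below) =====
def Claim_equal_side_by_side : Prop := ∀ (strings : List String) (size : Int) (space : Int), Dom_side_by_side strings size space → Pre_side_by_side strings size space → Spec_side_by_side strings size space (side_by_side strings size space)

-- ===== LEMMAS AND PROOFS =====

-- (line + ' '*(size-len(line)))[:size] equals A's truncate-or-pad branch
lemma pvCellB_eq (size : Int) (line : List Char) :
    pvCellB size line =
      if size ≤ (line.length : Int) then PySem.List.slice line none (some size)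
      else line ++ pvSpaces (size - line.length) := by
  unfold pvCellB pvSpaces
  split
  · next h =>
    have h0 : (size - (line.length : Int)).toNat = 0 := by omega
    simp [h0]
  · next h =>
    rw [PySem.List.slice_to _ (by omega : (0:Int) ≤ size)]
    apply List.take_of_length_le
    simp
    omega

lemma pvBlank_eq (size : Int) : PySem.List.slice (pvSpaces size) none (some size) = pvSpaces size := by
  by_cases h : 0 ≤ size
  · rw [PySem.List.slice_to _ h]
    apply List.take_of_length_le
    simp [pvSpaces]
  · have h0 : size.toNat = 0 := by omega
    simp [pvSpaces, h0, PySem.List.slice]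

-- A's separator-after-every-cell-except-last fold is join
lemma pvFold_enum_join {α : Type} (f : α → List Char) (sep : List Char) (L : Int) :
    ∀ (xs : List α) (k : Int) (acc : List Char), k + xs.length = L →
    (PySem.List.enumerate xs k).foldl (fun acc js =>
        if js.1 < L - 1 then (acc ++ f js.2) ++ sep else acc ++ f js.2) acc
      = acc ++ PySem.Chars.join sep (xs.map f) := by
  intro xs
  induction xs with
  | nil => intro k acc _; simp [PySem.List.enumerate_nil, PySem.Chars.join_nil]
  | cons x xs ih =>
    intro k acc hL
    cases xs with
    | nil =>
      have hcond : ¬ (k < L - 1) := by simp at hL; omega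
      simp [PySem.List.enumerate_cons, PySem.List.enumerate_nil, hcond, PySem.Chars.join_singleton]
    | cons y t =>
      have hcond : k < L - 1 := by
        simp at hL
        omega
      rw [PySem.List.enumerate_cons, List.foldl_cons]
      simp only [hcond, if_pos]
      rw [ih (k + 1) _ (by simp at hL ⊢; omega)]
      simp [PySem.Chars.join_cons_cons, List.append_assoc]

-- zip(*cols) over equal-length nonempty column lists is index-wise transposition
lemma pvZipAll_eq (n : Nat) (cols : List (List (List Char)))
    (hne : cols ≠ []) (hlen : ∀ c ∈ cols, c.length = n) :
    pvZipAll cols = (List.range n).map (fun i => cols.map (fun c => c.getD i [])) := by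
  induction n generalizing cols with
  | zero =>
    cases cols with
    | nil => exact absurd rfl hne
    | cons c rest =>
      have hc : c = [] := List.eq_nil_of_length_eq_zero (hlen c (by simp))
      subst hc
      simp [pvZipAll]
  | succ n ih =>
    cases cols with
    | nil => exact absurd rfl hne
    | cons c rest =>
      have hall : (c :: rest).all (fun l => !l.isEmpty) = true := by
        rw [List.all_eq_true]
        intro l hl
        have hli := hlen l hl
        cases l with
        | nil => simp at hli
        | cons a t => rfl
      rw [pvZipAll, if_pos hall]
      rw [ih ((c :: rest).map (fun l => l.tail)) (by simp)
            (by intro l hl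
                simp only [List.mem_map] at hl
                obtain ⟨a, ha, rfl⟩ := hl
                have := hlen a ha
                simp [List.length_tail, this])]
      rw [List.range_succ_eq_map]
      simp only [List.map_cons, List.map_map, Function.comp_def]
      congr 1
      · congr 1
        · have := hlen c (by simp)
          cases c with
          | nil => simp at this
          | cons a t => simp
        · apply List.map_congr_left
          intro l hl
          have := hlen l (by simp [hl])
          cases l with
          | nil => simp at this
          | cons a t => simp
      · apply List.map_congr_left
        intro i _
        try simp only [Function.comp_def, List.map_cons]
        congr 1
        · have := hlen c (by simp)
          cases c with
          | nil => simp at this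
          | cons a t => simp
        · apply List.map_congr_left
          intro l hl
          have := hlen l (by simp [hl])
          cases l with
          | nil => simp at this
          | cons a t => simp

-- the i-th cell of a padded column equals A's i-th cell of that column
lemma pvPaddedCell_eq (size : Int) (maxLen : Nat) (c : List (List Char)) (i : Nat)
    (hi : i < maxLen) (hc : c.length ≤ maxLen) :
    (c.map (pvCellB size) ++ List.replicate (maxLen - c.length) (PySem.List.slice (pvSpaces size) none (some size))).getD i []
      = if c.length ≤ i then pvSpaces size
        else if size ≤ ((c.getD i []).length : Int) then PySem.List.slice (c.getD i []) none (some size)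
        else c.getD i [] ++ pvSpaces (size - (c.getD i []).length) := by
  rw [pvBlank_eq]
  by_cases h : c.length ≤ i
  · rw [if_pos h]
    rw [List.getD_eq_getElem?_getD, List.getElem?_append_right (by simpa using h)]
    rw [List.getElem?_replicate, if_pos (by simp; omega)]
    rfl
  · have hlt : i < c.length := by omega
    rw [if_neg h]
    simp only [List.getD_eq_getElem?_getD,
      List.getElem?_append_left (by simpa using hlt : i < (c.map (pvCellB size)).length),
      List.getElem?_map, List.getElem?_eq_getElem hlt, Option.map_some, Option.getD_some]
    exact pvCellB_eq size _

theorem side_by_side_spec : Claim_equal_side_by_side := by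
  intro strings size space _ hpre
  unfold Spec_side_by_side
  simp only [side_by_side, side_by_side_alt]
  set ss : List (List (List Char)) := strings.map (fun s => PySem.Chars.splitOn s.toList ['\n']) with hss
  set sep : List Char := pvSpaces space ++ ['|'] ++ pvSpaces space with hsep
  set maxLen : Nat := ((PySem.List.max? (ss.map (fun s => (s.length : Int))) id).getD 0).toNat with hml
  have hss_ne : ss ≠ [] := by
    rw [hss]
    simpa using hpre
  have hmax : ∀ c ∈ ss, c.length ≤ maxLen := by
    intro c hc
    obtain ⟨m, hm⟩ : ∃ m, PySem.List.max? (ss.map (fun s => (s.length : Int))) id = some m := by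
      rcases h : PySem.List.max? (ss.map (fun s => (s.length : Int))) id with _ | m
      · rw [PySem.List.max?_eq_none_iff] at h
        simp at h
        exact absurd h hss_ne
      · exact ⟨m, h⟩
    have hle : (c.length : Int) ≤ m := by
      have := PySem.List.max?_isMax hm ((c.length : Int)) (List.mem_map_of_mem hc)
      simpa using this
    have hmm : maxLen = m.toNat := by rw [hml, hm]; rfl
    omega
  rw [pvZipAll_eq maxLen _ (by simpa using hss_ne)
        (by intro l hl
            simp only [List.mem_map] at hl
            obtain ⟨a, ha, rfl⟩ := hl
            have := hmax a ha
            simp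
            omega)]
  congr 1
  congr 1
  simp only [List.map_map]
  apply List.map_congr_left
  intro i hi
  have hilt : i < maxLen := List.mem_range.mp hi
  try simp only [Function.comp_def]
  congr 1
  have h1 := pvFold_enum_join
      (fun s : List (List Char) =>
        if s.length ≤ i then pvSpaces size
        else if size ≤ ((s.getD i []).length : Int) then PySem.List.slice (s.getD i []) none (some size)
        else s.getD i [] ++ pvSpaces (size - (s.getD i []).length))
      sep (ss.length : Int) ss 0 [] (by simp)
  simp only [] at h1
  rw [h1, List.nil_append]
  congr 1
  try simp only [List.map_map]
  try simp only [Function.comp_def]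
  apply List.map_congr_left
  intro c hc
  exact (pvPaddedCell_eq size maxLen c i hilt (hmax c hc)).symm
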